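-- pv_equiv track=rewrite | github.com/Methane-Kun/DePaul_CODE | CSC401_IntroProgram/codes/Kun_Shan_Final.py | upper
-- ===== SOURCE A (Python) =====
-- def upper(M: list[list[int]]) -> list[list[int]]:
--     from copy import deepcopy
--     N = deepcopy(M)
--     l = len(N)
--     for i in range(l):
--         if len(N[i]) != l:
--             return []
--         for j in range(0, i):
--             N[i][j] = 0
--     return N
-- ===== SOURCE B (Python) =====
-- def upper(M: list[list[int]]) -> list[list[int]]:
--     l = len(M)
--     out = []
--     for i, row in enumerate(M):
--         if len(row) != l:
--             return []
--         out.append([0] * i + row[i:])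
--     return out
-- ===== Notes on version B (the rewrite author's own statement) =====
-- stated objective: simpler
-- what changed: Replaces deepcopy-then-mutate with per-cell inner zeroing loops by a single streaming pass that builds each output row as a zero block concatenated with a tail slice ([0]*i + row[i:]), eliminating both the deepcopy and the inner element loop.
import Mathlib
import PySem

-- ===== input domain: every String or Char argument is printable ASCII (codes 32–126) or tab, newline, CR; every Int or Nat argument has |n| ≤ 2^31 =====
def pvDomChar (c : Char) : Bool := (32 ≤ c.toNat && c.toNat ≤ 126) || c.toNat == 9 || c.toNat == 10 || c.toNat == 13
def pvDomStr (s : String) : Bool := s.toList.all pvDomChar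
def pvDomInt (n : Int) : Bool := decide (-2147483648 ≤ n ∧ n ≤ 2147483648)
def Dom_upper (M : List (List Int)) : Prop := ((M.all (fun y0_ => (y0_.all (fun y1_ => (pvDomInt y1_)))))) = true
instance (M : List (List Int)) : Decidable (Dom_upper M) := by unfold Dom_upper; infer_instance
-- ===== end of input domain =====

-- B replaces A's deepcopy-then-mutate (inner per-cell zeroing loops) by one streaming pass
-- that emits each output row as a zero block ++ tail slice; simpler, no copy and no inner loop.

-- ===== PORT A =====
-- one iteration of A's outer loop: early 'return []' is modelled as none, propagated
def upperAStep (l : Nat) (acc : Option (List (List Int))) (i : Nat) : Option (List (List Int)) :=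
  match acc with
  | none => none
  | some N =>
    let row := N.getD i []   -- N[i]; i < l = N.length throughout the loop
    if row.length ≠ l then none
    else some (N.set i ((List.range i).foldl (fun r j => r.set j 0) row))

def upper (M : List (List Int)) : List (List Int) :=
  let N := M                -- deepcopy
  let l := N.length
  match (List.range l).foldl (upperAStep l) (some N) with
  | some N' => N'
  | none => []

-- ===== PORT B =====
-- B's 'for i, row in enumerate(M)' loop with its 'out' accumulator; early 'return []' = none.
-- row[i:] with i ≥ 0 is List.drop i row (exact for nonnegative slice starts); [0]*i is replicate.
def upperBGo (l : Nat) (i : Nat) (rows out : List (List Int)) : Option (List (List Int)) :=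
  match rows with
  | [] => some out
  | row :: rest =>
      if row.length ≠ l then none
      else upperBGo l (i + 1) rest (out ++ [List.replicate i 0 ++ row.drop i])

def upper_alt (M : List (List Int)) : List (List Int) :=
  match upperBGo M.length 0 M [] with
  | some out => out
  | none => []

-- ===== PRECONDITION & SPEC =====
def Spec_upper (M : List (List Int)) (out : List (List Int)) : Prop := out = upper_alt M
instance (M : List (List Int)) (out : List (List Int)) : Decidable (Spec_upper M out) := by unfold Spec_upper; infer_instance

-- ===== CLAIM (what is proved, stated in full; the proofs are below) =====
def Claim_equal_upper : Prop := ∀ (M : List (List Int)), Dom_upper M → Spec_upper M (upper M)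

-- ===== LEMMAS AND PROOFS =====

theorem zfold_length (k : Nat) (r : List Int) :
    ((List.range k).foldl (fun r j => r.set j 0) r).length = r.length := by
  induction k with
  | zero => simp
  | succ k ih => simp [List.range_succ, List.foldl_append, ih]

theorem zfold_getElem (k : Nat) (r : List Int) (j : Nat)
    (h : j < ((List.range k).foldl (fun r j => r.set j 0) r).length) :
    ((List.range k).foldl (fun r j => r.set j 0) r)[j] = if j < k then 0 else r[j]'(by simpa [zfold_length] using h) := by
  induction k with
  | zero => simp
  | succ k ih =>
    have h' : j < ((List.range k).foldl (fun r j => r.set j 0) r).length := by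
      simpa [zfold_length] using (by simpa [zfold_length] using h : j < r.length)
    simp only [List.range_succ, List.foldl_append, List.foldl_cons, List.foldl_nil]
    rw [List.getElem_set]
    rcases eq_or_ne k j with rfl | hne
    · simp
    · rw [if_neg hne, ih h']
      have : j < k + 1 ↔ j < k := by omega
      simp [this]

-- A's zeroed row equals B's zero-block ++ slice row
theorem rowEq (r : List Int) (i : Nat) (hi : i ≤ r.length) :
    (List.range i).foldl (fun r j => r.set j 0) r
      = List.replicate i (0 : Int) ++ r.drop i := by
  apply List.ext_getElem
  · simp [zfold_length]; omega
  · intro j h1 h2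
    have hjr : j < r.length := by simpa [zfold_length] using h1
    rw [zfold_getElem]
    rcases Nat.lt_or_ge j i with h | h
    · rw [if_pos h, List.getElem_append_left (by simpa using h), List.getElem_replicate]
    · rw [if_neg (by omega), List.getElem_append_right (by simpa using h)]
      simp [List.getElem_drop]
      congr 1
      omega

-- the canonical result for a square matrix (both ports reach it)
def sqTarget (M : List (List Int)) : List (List Int) :=
  (M.zipIdx 0).map (fun p => List.replicate p.2 (0 : Int) ++ p.1.drop p.2)

-- the good case for A: every row of M has length l; the fold finishes and builds sqTarget
theorem A_good (M : List (List Int)) (l : Nat) (hl : M.length = l)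
    (hall : ∀ row ∈ M, row.length = l) :
    ∀ (n a : Nat) (N : List (List Int)), a + n = l → N.length = l →
    (∀ i, a ≤ i → N.getD i [] = M.getD i []) →
    (∀ i, i < a → N.getD i [] = List.replicate i (0 : Int) ++ (M.getD i []).drop i) →
    (List.range' a n).foldl (upperAStep l) (some N)
      = some ((List.range l).map (fun i => List.replicate i (0 : Int) ++ (M.getD i []).drop i)) := by
  intro n
  induction n with
  | zero =>
    intro a N han hN hhi hlo
    simp only [List.range'_zero, List.foldl_nil, Option.some.injEq]
    apply List.ext_getElem
    · simp [hN]
    · intro i h1 h2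
      have hil : i < l := by omega
      have := hlo i (by omega)
      rw [List.getD_eq_getElem N [] h1] at this
      simp [this]
  | succ n ih =>
    intro a N han hN hhi hlo
    have hal : a < l := by omega
    have haM : M.getD a [] = M[a]'(by omega) := List.getD_eq_getElem M [] (by omega)
    have hlen : (M.getD a []).length = l := by
      rw [haM]; exact hall _ (List.getElem_mem _)
    have hNa : N.getD a [] = M.getD a [] := hhi a le_rfl
    rw [List.range'_succ, List.foldl_cons]
    have hstep : upperAStep l (some N) a
        = some (N.set a ((List.range a).foldl (fun r j => r.set j 0) (N.getD a []))) := by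
      simp [upperAStep, ← List.getD_eq_getElem?_getD, hNa, hlen]
    rw [hstep]
    apply ih (a + 1) _ (by omega) (by simp [hN])
    · intro i hi
      have hia : a ≠ i := by omega
      rcases Nat.lt_or_ge i l with h | h
      · rw [List.getD_eq_getElem _ [] (by simp [hN]; omega), List.getElem_set,
            if_neg hia, ← List.getD_eq_getElem N [] (by omega)]
        exact hhi i (by omega)
      · rw [List.getD_eq_default _ _ (by simp [hN]; omega), List.getD_eq_default _ _ (by omega)]
    · intro i hi
      rcases eq_or_ne i a with rfl | hne
      · rw [List.getD_eq_getElem _ [] (by simp [hN]; omega), List.getElem_set, if_pos rfl,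
            hNa, rowEq _ i (by omega)]
      · rw [List.getD_eq_getElem _ [] (by simp [hN]; omega), List.getElem_set,
            if_neg (by omega), ← List.getD_eq_getElem N [] (by omega)]
        exact hlo i (by omega)

theorem A_none_prop (l : Nat) (xs : List Nat) :
    xs.foldl (upperAStep l) none = none := by
  induction xs with
  | nil => rfl
  | cons x xs ih => simpa [upperAStep] using ih

-- the bad case for A: some remaining row is not of length l; the fold returns none
theorem A_bad (M : List (List Int)) (l : Nat) (hl : M.length = l) :
    ∀ (n a : Nat) (N : List (List Int)), a + n = l → N.length = l →
    (∀ i, a ≤ i → N.getD i [] = M.getD i []) →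
    (∃ i, a ≤ i ∧ i < l ∧ (M.getD i []).length ≠ l) →
    (List.range' a n).foldl (upperAStep l) (some N) = none := by
  intro n
  induction n with
  | zero =>
    intro a N han hN hhi ⟨i, h1, h2, h3⟩
    omega
  | succ n ih =>
    intro a N han hN hhi hbad
    rw [List.range'_succ, List.foldl_cons]
    by_cases hblen : (N.getD a []).length = l
    · have hstep : upperAStep l (some N) a
          = some (N.set a ((List.range a).foldl (fun r j => r.set j 0) (N.getD a []))) := by
        simp [upperAStep, ← List.getD_eq_getElem?_getD, hblen]
      rw [hstep]
      obtain ⟨i, h1, h2, h3⟩ := hbad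
      have hia : i ≠ a := by
        intro h; subst h
        exact h3 (by rw [← hhi i le_rfl]; exact hblen)
      apply ih (a + 1) _ (by omega) (by simp [hN])
      · intro j hj
        have hja : a ≠ j := by omega
        rcases Nat.lt_or_ge j l with h | h
        · rw [List.getD_eq_getElem _ [] (by simp [hN]; omega), List.getElem_set,
              if_neg hja, ← List.getD_eq_getElem N [] (by omega)]
          exact hhi j (by omega)
        · rw [List.getD_eq_default _ _ (by simp [hN]; omega), List.getD_eq_default _ _ (by omega)]
      · exact ⟨i, by omega, h2, h3⟩
    · have : upperAStep l (some N) a = none := by simp [upperAStep, ← List.getD_eq_getElem?_getD, hblen]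
      rw [this]; exact A_none_prop l _

-- the good case for B: all remaining rows have length l; the recursion appends their images
theorem B_good (l : Nat) :
    ∀ (rows : List (List Int)) (a : Nat) (out : List (List Int)),
    (∀ row ∈ rows, row.length = l) →
    upperBGo l a rows out
      = some (out ++ (rows.zipIdx a).map (fun p => List.replicate p.2 (0 : Int) ++ p.1.drop p.2)) := by
  intro rows
  induction rows with
  | nil => intro a out _; simp [upperBGo]
  | cons row rest ih =>
    intro a out hall
    have hrow : row.length = l := hall _ List.mem_cons_self
    rw [upperBGo, if_neg (by simp [hrow]), ih (a + 1) _ (fun r h => hall r (List.mem_cons_of_mem _ h))]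
    simp [List.zipIdx_cons]

-- the bad case for B: some remaining row has the wrong length; the recursion returns none
theorem B_bad (l : Nat) :
    ∀ (rows : List (List Int)) (a : Nat) (out : List (List Int)),
    (∃ row ∈ rows, row.length ≠ l) →
    upperBGo l a rows out = none := by
  intro rows
  induction rows with
  | nil => intro a out ⟨r, hr, _⟩; simp at hr
  | cons row rest ih =>
    intro a out ⟨r, hr, hlen⟩
    by_cases h : row.length = l
    · rw [upperBGo, if_neg (by simp [h])]
      apply ih
      rcases List.mem_cons.mp hr with rfl | hmem
      · exact absurd h hlen
      · exact ⟨r, hmem, hlen⟩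
    · rw [upperBGo, if_pos (by simpa using h)]

-- bridge: A's range-map form of the target equals B's zipIdx form
theorem target_eq (M : List (List Int)) :
    (List.range M.length).map (fun i => List.replicate i (0 : Int) ++ (M.getD i []).drop i)
      = (M.zipIdx 0).map (fun p => List.replicate p.2 (0 : Int) ++ p.1.drop p.2) := by
  apply List.ext_getElem
  · simp
  · intro i h1 h2
    have hi : i < M.length := by simpa using h1
    simp [List.getElem_zipIdx, List.getElem?_eq_getElem hi]

-- ===== VERDICT (by name: the statement is the Claim_ definition above) =====
theorem upper_spec : Claim_equal_upper := by
  unfold Claim_equal_upper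
  intro M _
  unfold Spec_upper upper upper_alt
  simp only []
  by_cases hbad : ∃ row ∈ M, row.length ≠ M.length
  · rw [B_bad M.length M 0 [] hbad]
    obtain ⟨row, hmem, hlen⟩ := hbad
    obtain ⟨i, hi, hrow⟩ := List.mem_iff_getElem.mp hmem
    have hA : (List.range M.length).foldl (upperAStep M.length) (some M) = none := by
      rw [List.range_eq_range']
      apply A_bad M M.length rfl M.length 0 M (Nat.zero_add _) rfl (fun _ _ => rfl)
      exact ⟨i, Nat.zero_le _, hi, by rw [List.getD_eq_getElem M [] hi, hrow]; exact hlen⟩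
    simp [hA]
  · push_neg at hbad
    rw [B_good M.length M 0 [] hbad]
    have hA := A_good M M.length rfl hbad M.length 0 M (Nat.zero_add _) rfl
      (fun _ _ => rfl) (fun i h => by omega)
    rw [List.range_eq_range']
    simp only [hA, List.nil_append]
    simpa [List.getD] using target_eq M
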